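-- pv_equiv track=rewrite | github.com/dgg32/pyspark_sam | helper_function.py | mdzToList
-- ===== SOURCE A (Python) =====
-- def mdzToList(md):
--     ''' Parse MD:Z string into a list of operations, where 0=match,
--         1=read gap, 2=mismatch. '''
--     i = 0
--     ret = [] # list of (op, run, str) tuples
--     while i < len(md):
--         if md[i].isdigit(): # stretch of matches
--             run = 0
--             while i < len(md) and md[i].isdigit():
--                 run *= 10
--                 run += int(md[i])
--                 i += 1 # skip over digit
--             if run > 0:
--                 ret.append([0, run, ""])
--         elif md[i].isalpha(): # stretch of mismatches
--             mmstr = ""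
--             while i < len(md) and md[i].isalpha():
--                 mmstr += md[i]
--                 i += 1
--             assert len(mmstr) > 0
--             ret.append([1, len(mmstr), mmstr])
--         elif md[i] == "^": # read gap
--             i += 1 # skip over ^
--             refstr = ""
--             while i < len(md) and md[i].isalpha():
--                 refstr += md[i]
--                 i += 1 # skip over inserted character
--             assert len(refstr) > 0
--             ret.append([2, len(refstr), refstr])
--         else:
--             raise RuntimeError('Unexpected character in MD:Z: "%d"' % md[i])
--     return ret
-- ===== SOURCE B (Python) =====
-- def mdzToList(md):
--     ''' Parse MD:Z string into a list of operations, where 0=match,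
--         1=read gap, 2=mismatch.  Two-phase version: first split the string
--         into maximal runs of like characters, then translate the runs,
--         a '^' run consuming the following letter run. '''
--     # phase 1: maximal runs, tagged 'd' (digits), 'a' (letters) or the char itself
--     runs = []
--     for c in md:
--         k = 'd' if c.isdigit() else ('a' if c.isalpha() else c)
--         if runs and runs[-1][0] == k and k in ('d', 'a'):
--             runs[-1][1] += c
--         else:
--             runs.append([k, c])
--     # phase 2: translate runs into operation triples
--     out = []
--     i = 0
--     while i < len(runs):
--         k, s = runs[i]
--         i += 1
--         if k == 'd':
--             run = 0
--             for ch in s: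
--                 run = run * 10 + (ord(ch) - 48)
--             if run > 0:
--                 out.append([0, run, ""])
--         elif k == 'a':
--             out.append([1, len(s), s])
--         elif k == '^':
--             assert i < len(runs) and runs[i][0] == 'a', 'gap without reference bases'
--             out.append([2, len(runs[i][1]), runs[i][1]])
--             i += 1
--         else:
--             raise ValueError('unexpected character in MD:Z: %r' % s)
--     return out
-- ===== Notes on version B (the rewrite author's own statement) =====
-- stated objective: alternative
-- what changed: Replaces A's single index-driven scan with three nested char-by-char while loops by a two-phase algorithm: first group the string into maximal runs of like characters, then translate the run list into operation triples, a '^' run consuming the following letter run.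
import Mathlib
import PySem

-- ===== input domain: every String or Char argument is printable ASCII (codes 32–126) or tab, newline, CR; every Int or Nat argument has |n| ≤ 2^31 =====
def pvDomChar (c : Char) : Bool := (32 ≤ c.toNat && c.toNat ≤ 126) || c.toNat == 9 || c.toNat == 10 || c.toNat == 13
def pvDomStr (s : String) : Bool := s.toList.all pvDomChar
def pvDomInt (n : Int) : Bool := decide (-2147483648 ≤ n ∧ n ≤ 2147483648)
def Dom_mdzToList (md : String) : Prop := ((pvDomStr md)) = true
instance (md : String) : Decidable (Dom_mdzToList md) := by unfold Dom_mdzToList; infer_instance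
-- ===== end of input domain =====

-- B replaces A's single index-driven scan (three nested char-by-char while loops) by a
-- two-phase algorithm: group the string into maximal runs of like characters, then translate
-- the run list, a '^' run consuming the following letter run (objective: alternative).

-- ===== PORT A =====
-- inner while loop 'while i < len(md) and md[i].isdigit(): run = run*10 + int(md[i]); i += 1'
-- (int(md[i]) on a single ASCII digit character is its digit value c.toNat - 48: exact there)
def pvA_digits (run : Int) : List Char → Int × List Char
  | [] => (run, [])
  | c :: rest =>
    if PySem.Chars.isdigit c then pvA_digits (run * 10 + ((c.toNat : Int) - 48)) rest
    else (run, c :: rest)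

-- inner while loop 'while i < len(md) and md[i].isalpha(): acc += md[i]; i += 1'
def pvA_alpha (acc : List Char) : List Char → List Char × List Char
  | [] => (acc, [])
  | c :: rest =>
    if PySem.Chars.isalpha c then pvA_alpha (acc ++ [c]) rest
    else (acc, c :: rest)

-- termination facts for the outer while loop (cited by pvA_loop's decreasing_by)
theorem pvA_digits_snd_le (run : Int) (cs : List Char) :
    (pvA_digits run cs).2.length ≤ cs.length := by
  induction cs generalizing run with
  | nil => simp [pvA_digits]
  | cons c rest ih =>
    simp only [pvA_digits]
    split
    · exact Nat.le_succ_of_le (ih _)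
    · simp

theorem pvA_alpha_snd_le (acc : List Char) (cs : List Char) :
    (pvA_alpha acc cs).2.length ≤ cs.length := by
  induction cs generalizing acc with
  | nil => simp [pvA_alpha]
  | cons c rest ih =>
    simp only [pvA_alpha]
    split
    · exact Nat.le_succ_of_le (ih _)
    · simp

theorem pvA_digits_snd_lt (run : Int) (c : Char) (rest : List Char)
    (h : PySem.Chars.isdigit c = true) :
    (pvA_digits run (c :: rest)).2.length < (c :: rest).length := by
  simp only [pvA_digits, h, if_true, List.length_cons]
  exact Nat.lt_succ_of_le (pvA_digits_snd_le _ _)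

theorem pvA_alpha_snd_lt (acc : List Char) (c : Char) (rest : List Char)
    (h : PySem.Chars.isalpha c = true) :
    (pvA_alpha acc (c :: rest)).2.length < (c :: rest).length := by
  simp only [pvA_alpha, h, if_true, List.length_cons]
  exact Nat.lt_succ_of_le (pvA_alpha_snd_le _ _)

-- the outer 'while i < len(md)' loop of A; the final 'else: raise' branch is excluded by
-- Pre_mdzToList (A raises there), as is the empty-refstr assert in the '^' branch
def pvA_loop : List Char → List (Int × Int × String)
  | [] => []
  | c :: rest =>
    if hd : PySem.Chars.isdigit c then
      (if (pvA_digits 0 (c :: rest)).1 > 0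
        then [((0 : Int), (pvA_digits 0 (c :: rest)).1, "")] else [])
        ++ pvA_loop (pvA_digits 0 (c :: rest)).2
    else if ha : PySem.Chars.isalpha c then
      ((1 : Int), ((pvA_alpha [] (c :: rest)).1.length : Int),
        String.ofList (pvA_alpha [] (c :: rest)).1)
        :: pvA_loop (pvA_alpha [] (c :: rest)).2
    else if c = '^' then
      ((2 : Int), ((pvA_alpha [] rest).1.length : Int), String.ofList (pvA_alpha [] rest).1)
        :: pvA_loop (pvA_alpha [] rest).2
    else []  -- raise RuntimeError (in fact TypeError): outside Pre_mdzToList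
termination_by cs => cs.length
decreasing_by
  · exact pvA_digits_snd_lt 0 c rest hd
  · exact pvA_alpha_snd_lt [] c rest ha
  · exact Nat.lt_succ_of_le (pvA_alpha_snd_le [] rest)

def mdzToList (md : String) : List (Int × Int × String) := pvA_loop md.toList

-- ===== PORT B =====
-- k = 'd' if c.isdigit() else ('a' if c.isalpha() else c)
def pvB_kind (c : Char) : Char :=
  if PySem.Chars.isdigit c then 'd' else if PySem.Chars.isalpha c then 'a' else c

-- body of B's phase-1 'for c in md' loop (extend the last run or start a new one)
def pvB_step (runs : List (Char × List Char)) (c : Char) : List (Char × List Char) :=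
  match runs.getLast? with
  | some (k', s) =>
    if k' = pvB_kind c ∧ (pvB_kind c = 'd' ∨ pvB_kind c = 'a')
    then runs.dropLast ++ [(k', s ++ [c])]
    else runs ++ [(pvB_kind c, [c])]
  | none => runs ++ [(pvB_kind c, [c])]

-- B's phase-2 'while i < len(runs)' loop; the failing assert ('^' not followed by letters)
-- and the ValueError branch are excluded by Pre_mdzToList (both A and B raise there)
def pvB_tr : List (Char × List Char) → List (Int × Int × String)
  | [] => []
  | (k, s) :: rest =>
    if k = 'd' then
      (if s.foldl (fun r ch => r * 10 + ((ch.toNat : Int) - 48)) 0 > 0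
        then [((0 : Int), s.foldl (fun r ch => r * 10 + ((ch.toNat : Int) - 48)) 0, "")]
        else [])
        ++ pvB_tr rest
    else if k = 'a' then ((1 : Int), (s.length : Int), String.ofList s) :: pvB_tr rest
    else if k = '^' then
      match rest with
      | ('a', ref) :: rest2 => ((2 : Int), (ref.length : Int), String.ofList ref) :: pvB_tr rest2
      | _ => []  -- assert fails: outside Pre_mdzToList
    else []  -- raise ValueError: outside Pre_mdzToList
termination_by gs => gs.length
decreasing_by
  all_goals simp only [List.length_cons]
  all_goals omega

def mdzToList_alt (md : String) : List (Int × Int × String) :=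
  pvB_tr (md.toList.foldl pvB_step [])

-- ===== PRECONDITION & SPEC =====
-- Pre_ excludes exactly the inputs on which A raises: a character that is neither a digit,
-- a letter nor '^' (A's final raise), and a '^' not immediately followed by a letter
-- (A's 'assert len(refstr) > 0' fails).  Positional shape check, no simulation of either port.
def pvPreOk : List Char → Bool
  | [] => true
  | c :: rest =>
    (PySem.Chars.isdigit c || PySem.Chars.isalpha c || c == '^')
      && (!(c == '^') || (match rest with | d :: _ => PySem.Chars.isalpha d | [] => false))
      && pvPreOk rest

def Pre_mdzToList (md : String) : Prop := pvPreOk md.toList = true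
instance (md : String) : Decidable (Pre_mdzToList md) := by unfold Pre_mdzToList; infer_instance

def pvWitness_mdzToList : String := "10A5^AC0T"

def Spec_mdzToList (md : String) (out : List (Int × Int × String)) : Prop := out = mdzToList_alt md
instance (md : String) (out : List (Int × Int × String)) : Decidable (Spec_mdzToList md out) := by
  unfold Spec_mdzToList; infer_instance

-- ===== CLAIM (what is proved, stated in full; the proofs are below) =====
def Claim_equal_mdzToList : Prop :=
  ∀ (md : String), Dom_mdzToList md → Pre_mdzToList md → Spec_mdzToList md (mdzToList md)

-- ===== LEMMAS AND PROOFS =====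

-- proof-side view of B's phase 1: prepend one character to a run list, merging into the
-- first run when the kinds match and are mergeable ('d' or 'a')
def pvMerge1 (k : Char) (c : Char) : List (Char × List Char) → List (Char × List Char)
  | (k1, s1) :: rest =>
    if k1 = k ∧ (k = 'd' ∨ k = 'a') then (k1, c :: s1) :: rest
    else (k, [c]) :: (k1, s1) :: rest
  | [] => [(k, [c])]

-- front-to-back grouping: the value B's phase-1 fold computes
def pvG : List Char → List (Char × List Char)
  | [] => []
  | c :: rest => pvMerge1 (pvB_kind c) c (pvG rest)

-- concatenation of an accumulator with a group list, merging at the boundary once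
def pvMergeRuns (acc : List (Char × List Char)) : List (Char × List Char) → List (Char × List Char)
  | [] => acc
  | (k, s) :: rest =>
    match acc.getLast? with
    | some (k', s') =>
      if k' = k ∧ (k = 'd' ∨ k = 'a') then acc.dropLast ++ (k', s' ++ s) :: rest
      else acc ++ (k, s) :: rest
    | none => (k, s) :: rest

-- equation lemmas keeping the raw matches out of goals
theorem pvB_step_none {acc : List (Char × List Char)} (c : Char) (h : acc.getLast? = none) :
    pvB_step acc c = acc ++ [(pvB_kind c, [c])] := by
  unfold pvB_step; rw [h]

theorem pvB_step_some {acc : List (Char × List Char)} (c : Char) {k' : Char} {s' : List Char}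
    (h : acc.getLast? = some (k', s')) :
    pvB_step acc c =
      if k' = pvB_kind c ∧ (pvB_kind c = 'd' ∨ pvB_kind c = 'a')
      then acc.dropLast ++ [(k', s' ++ [c])] else acc ++ [(pvB_kind c, [c])] := by
  unfold pvB_step; rw [h]

theorem pvMergeRuns_nil_right (acc : List (Char × List Char)) : pvMergeRuns acc [] = acc := rfl

theorem pvMergeRuns_cons_none {acc : List (Char × List Char)} (k : Char) (s : List Char)
    (rest : List (Char × List Char)) (h : acc.getLast? = none) :
    pvMergeRuns acc ((k, s) :: rest) = (k, s) :: rest := by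
  unfold pvMergeRuns; rw [h]

theorem pvMergeRuns_cons_some {acc : List (Char × List Char)} (k : Char) (s : List Char)
    (rest : List (Char × List Char)) {k' : Char} {s' : List Char}
    (h : acc.getLast? = some (k', s')) :
    pvMergeRuns acc ((k, s) :: rest) =
      if k' = k ∧ (k = 'd' ∨ k = 'a') then acc.dropLast ++ (k', s' ++ s) :: rest
      else acc ++ (k, s) :: rest := by
  unfold pvMergeRuns; rw [h]

theorem pvMerge1_nil (k c : Char) : pvMerge1 k c [] = [(k, [c])] := rfl

theorem pvMerge1_cons (k c k1 : Char) (s1 : List Char) (rest : List (Char × List Char)) :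
    pvMerge1 k c ((k1, s1) :: rest) =
      if k1 = k ∧ (k = 'd' ∨ k = 'a') then (k1, c :: s1) :: rest
      else (k, [c]) :: (k1, s1) :: rest := rfl

theorem pvMergeRuns_nil (gs : List (Char × List Char)) : pvMergeRuns [] gs = gs := by
  cases gs with
  | nil => rfl
  | cons g rest =>
    obtain ⟨k, s⟩ := g
    rw [pvMergeRuns_cons_none k s rest rfl]

theorem pvStep_assoc (acc : List (Char × List Char)) (c : Char) (gs : List (Char × List Char)) :
    pvMergeRuns (pvB_step acc c) gs = pvMergeRuns acc (pvMerge1 (pvB_kind c) c gs) := by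
  cases hL : acc.getLast? with
  | none =>
    have hacc : acc = [] := List.getLast?_eq_none_iff.mp hL
    subst hacc
    rw [pvB_step_none c rfl, List.nil_append, pvMergeRuns_nil]
    cases gs with
    | nil => rw [pvMerge1_nil, pvMergeRuns_nil_right]
    | cons g rest =>
      obtain ⟨k1, s1⟩ := g
      rw [pvMerge1_cons, pvMergeRuns_cons_some k1 s1 rest List.getLast?_singleton]
      by_cases hm : k1 = pvB_kind c ∧ (pvB_kind c = 'd' ∨ pvB_kind c = 'a')
      · rw [if_pos (⟨hm.1.symm, by rw [hm.1]; exact hm.2⟩ :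
              pvB_kind c = k1 ∧ (k1 = 'd' ∨ k1 = 'a')), if_pos hm]
        simp [hm.1]
      · rw [if_neg (fun hc => hm ⟨hc.1.symm, by rw [hc.1]; exact hc.2⟩), if_neg hm]
        simp
  | some g =>
    obtain ⟨k', s'⟩ := g
    cases gs with
    | nil =>
      rw [pvMerge1_nil, pvMergeRuns_nil_right, pvB_step_some c hL,
          pvMergeRuns_cons_some _ _ _ hL]
    | cons g2 rest =>
      obtain ⟨k1, s1⟩ := g2
      rw [pvB_step_some c hL, pvMerge1_cons]
      by_cases hm2 : k' = pvB_kind c ∧ (pvB_kind c = 'd' ∨ pvB_kind c = 'a')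
      · rw [if_pos hm2]
        by_cases hm : k1 = pvB_kind c ∧ (pvB_kind c = 'd' ∨ pvB_kind c = 'a')
        · have hCL : k' = k1 ∧ (k1 = 'd' ∨ k1 = 'a') :=
            ⟨hm2.1.trans hm.1.symm, by rw [hm.1]; exact hm.2⟩
          rw [if_pos hm, pvMergeRuns_cons_some k1 s1 rest List.getLast?_concat, if_pos hCL,
              List.dropLast_concat, pvMergeRuns_cons_some k1 (c :: s1) rest hL, if_pos hCL]
          simp
        · have hCL : ¬(k' = k1 ∧ (k1 = 'd' ∨ k1 = 'a')) := fun hc =>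
            hm ⟨(hc.1.symm.trans hm2.1), hm2.2⟩
          rw [if_neg hm, pvMergeRuns_cons_some k1 s1 rest List.getLast?_concat, if_neg hCL,
              pvMergeRuns_cons_some (pvB_kind c) [c] ((k1, s1) :: rest) hL, if_pos hm2]
          simp
      · rw [if_neg hm2]
        by_cases hm : k1 = pvB_kind c ∧ (pvB_kind c = 'd' ∨ pvB_kind c = 'a')
        · have hCL : pvB_kind c = k1 ∧ (k1 = 'd' ∨ k1 = 'a') :=
            ⟨hm.1.symm, by rw [hm.1]; exact hm.2⟩
          rw [if_pos hm, pvMergeRuns_cons_some k1 s1 rest List.getLast?_concat, if_pos hCL,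
              List.dropLast_concat, pvMergeRuns_cons_some k1 (c :: s1) rest hL,
              if_neg (fun hc => hm2 ⟨hc.1.trans hm.1, hm.2⟩)]
          simp [hm.1]
        · have hCL : ¬(pvB_kind c = k1 ∧ (k1 = 'd' ∨ k1 = 'a')) := fun hc =>
            hm ⟨hc.1.symm, by rw [hc.1]; exact hc.2⟩
          rw [if_neg hm, pvMergeRuns_cons_some k1 s1 rest List.getLast?_concat, if_neg hCL,
              pvMergeRuns_cons_some (pvB_kind c) [c] ((k1, s1) :: rest) hL, if_neg hm2]
          simp

theorem pvFold_eq (cs : List Char) :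
    ∀ acc, List.foldl pvB_step acc cs = pvMergeRuns acc (pvG cs) := by
  induction cs with
  | nil => intro acc; rfl
  | cons c rest ih =>
    intro acc
    rw [List.foldl_cons, ih, pvStep_assoc]
    rfl

-- head of pvMerge1 always carries kind k
theorem pvMerge1_head (k c : Char) (gs : List (Char × List Char)) :
    ∃ s t, pvMerge1 k c gs = (k, s) :: t := by
  cases gs with
  | nil => exact ⟨[c], [], rfl⟩
  | cons g rest =>
    obtain ⟨k1, s1⟩ := g
    rw [pvMerge1_cons]
    by_cases hm : k1 = k ∧ (k = 'd' ∨ k = 'a')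
    · exact ⟨c :: s1, rest, by rw [if_pos hm, hm.1]⟩
    · exact ⟨[c], (k1, s1) :: rest, by rw [if_neg hm]⟩

theorem pvB_kind_eq_d {c : Char} (h : pvB_kind c = 'd') : PySem.Chars.isdigit c = true := by
  unfold pvB_kind at h
  split_ifs at h with h1 h2
  · exact h1
  · exact absurd h (by decide)
  · subst h
    exact absurd (by decide : PySem.Chars.isalpha 'd' = true) (by simpa using h2)

theorem pvB_kind_eq_a {c : Char} (h : pvB_kind c = 'a') : PySem.Chars.isalpha c = true := by
  unfold pvB_kind at h
  split_ifs at h with h1 h2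
  · exact absurd h (by decide)
  · exact h2
  · subst h
    exact absurd (by decide : PySem.Chars.isalpha 'a' = true) (by simpa using h2)

theorem pvB_kind_of_digit {c : Char} (h : PySem.Chars.isdigit c = true) : pvB_kind c = 'd' := by
  simp [pvB_kind, h]

theorem pvB_kind_of_alpha {c : Char} (h : PySem.Chars.isalpha c = true)
    (h2 : PySem.Chars.isdigit c = false) : pvB_kind c = 'a' := by
  simp [pvB_kind, h, h2]

theorem pv_alpha_not_digit {c : Char} (h : PySem.Chars.isalpha c = true) :
    PySem.Chars.isdigit c = false := by
  simp only [PySem.Chars.isalpha, PySem.Chars.isupper, PySem.Chars.islower, Bool.or_eq_true,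
    Bool.and_eq_true, decide_eq_true_eq] at h
  simp only [PySem.Chars.isdigit, Bool.and_eq_false_iff, decide_eq_false_iff_not, not_le]
  rcases h with ⟨h1, _⟩ | ⟨h1, _⟩
  · exact Or.inr (lt_of_lt_of_le (by decide : ('9' : Char) < 'A') h1)
  · exact Or.inr (lt_of_lt_of_le (by decide : ('9' : Char) < 'a') h1)

theorem pvG_digit (c : Char) (rest : List Char) (h : PySem.Chars.isdigit c = true) :
    pvG (c :: rest) =
      ('d', c :: rest.takeWhile PySem.Chars.isdigit) :: pvG (rest.dropWhile PySem.Chars.isdigit) := by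
  induction rest generalizing c with
  | nil =>
    rw [show pvG [c] = pvMerge1 (pvB_kind c) c (pvG []) from rfl, pvB_kind_of_digit h]
    rfl
  | cons d rest2 ih =>
    rw [show pvG (c :: d :: rest2) = pvMerge1 (pvB_kind c) c (pvG (d :: rest2)) from rfl,
        pvB_kind_of_digit h]
    by_cases hd : PySem.Chars.isdigit d
    · rw [ih d hd, pvMerge1_cons, if_pos ⟨rfl, Or.inl rfl⟩,
          List.takeWhile_cons_of_pos hd, List.dropWhile_cons_of_pos hd]
    · have hd' : PySem.Chars.isdigit d = false := by simpa using hd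
      obtain ⟨s, t, hG⟩ := pvMerge1_head (pvB_kind d) d (pvG rest2)
      have hGd : pvG (d :: rest2) = (pvB_kind d, s) :: t := hG
      have hkd : pvB_kind d ≠ 'd' := fun hh => by rw [pvB_kind_eq_d hh] at hd'; cases hd'
      rw [hGd, pvMerge1_cons, if_neg (fun hc => hkd hc.1),
          List.takeWhile_cons_of_neg (by simp [hd']), List.dropWhile_cons_of_neg (by simp [hd']),
          hGd]

theorem pvG_alpha (c : Char) (rest : List Char) (h : PySem.Chars.isalpha c = true) :
    pvG (c :: rest) =
      ('a', c :: rest.takeWhile PySem.Chars.isalpha) :: pvG (rest.dropWhile PySem.Chars.isalpha) := by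
  induction rest generalizing c with
  | nil =>
    rw [show pvG [c] = pvMerge1 (pvB_kind c) c (pvG []) from rfl,
        pvB_kind_of_alpha h (pv_alpha_not_digit h)]
    rfl
  | cons d rest2 ih =>
    rw [show pvG (c :: d :: rest2) = pvMerge1 (pvB_kind c) c (pvG (d :: rest2)) from rfl,
        pvB_kind_of_alpha h (pv_alpha_not_digit h)]
    by_cases hd : PySem.Chars.isalpha d
    · rw [ih d hd, pvMerge1_cons, if_pos ⟨rfl, Or.inr rfl⟩,
          List.takeWhile_cons_of_pos hd, List.dropWhile_cons_of_pos hd]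
    · have hd' : PySem.Chars.isalpha d = false := by simpa using hd
      obtain ⟨s, t, hG⟩ := pvMerge1_head (pvB_kind d) d (pvG rest2)
      have hGd : pvG (d :: rest2) = (pvB_kind d, s) :: t := hG
      have hkd : pvB_kind d ≠ 'a' := fun hh => by rw [pvB_kind_eq_a hh] at hd'; cases hd'
      rw [hGd, pvMerge1_cons, if_neg (fun hc => hkd hc.1),
          List.takeWhile_cons_of_neg (by simp [hd']), List.dropWhile_cons_of_neg (by simp [hd']),
          hGd]

theorem pvG_other (c : Char) (rest : List Char) (h : PySem.Chars.isdigit c = false)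
    (h2 : PySem.Chars.isalpha c = false) :
    pvG (c :: rest) = (c, [c]) :: pvG rest := by
  have hk : pvB_kind c = c := by simp [pvB_kind, h, h2]
  have hnd : c ≠ 'd' := fun hc => by
    subst hc; cases (by decide : PySem.Chars.isalpha 'd' = true).symm.trans h2
  have hna : c ≠ 'a' := fun hc => by
    subst hc; cases (by decide : PySem.Chars.isalpha 'a' = true).symm.trans h2
  rw [show pvG (c :: rest) = pvMerge1 (pvB_kind c) c (pvG rest) from rfl, hk]
  cases hG : pvG rest with
  | nil => rfl
  | cons g t =>
    obtain ⟨k1, s1⟩ := g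
    rw [pvMerge1_cons, if_neg (fun hc => hc.2.elim hnd hna)]

theorem pvA_digits_eq (run : Int) (cs : List Char) :
    pvA_digits run cs =
      ((cs.takeWhile PySem.Chars.isdigit).foldl (fun r ch => r * 10 + ((ch.toNat : Int) - 48)) run,
        cs.dropWhile PySem.Chars.isdigit) := by
  induction cs generalizing run with
  | nil => simp [pvA_digits]
  | cons c rest ih =>
    by_cases h : PySem.Chars.isdigit c
    · simp [pvA_digits, h, ih, List.takeWhile_cons_of_pos h, List.dropWhile_cons_of_pos h]
    · have h' : PySem.Chars.isdigit c = false := by simpa using h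
      simp [pvA_digits, h', List.takeWhile_cons_of_neg h, List.dropWhile_cons_of_neg h]

theorem pvA_alpha_eq (acc : List Char) (cs : List Char) :
    pvA_alpha acc cs = (acc ++ cs.takeWhile PySem.Chars.isalpha, cs.dropWhile PySem.Chars.isalpha) := by
  induction cs generalizing acc with
  | nil => simp [pvA_alpha]
  | cons c rest ih =>
    by_cases h : PySem.Chars.isalpha c
    · simp [pvA_alpha, h, ih, List.takeWhile_cons_of_pos h, List.dropWhile_cons_of_pos h]
    · have h' : PySem.Chars.isalpha c = false := by simpa using h
      simp [pvA_alpha, h', List.takeWhile_cons_of_neg h, List.dropWhile_cons_of_neg h]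

theorem pvPreOk_tail {c : Char} {rest : List Char} (h : pvPreOk (c :: rest) = true) :
    pvPreOk rest = true := by
  simp only [pvPreOk, Bool.and_eq_true] at h
  exact h.2

theorem pvPreOk_dropWhile (p : Char → Bool) {cs : List Char} (h : pvPreOk cs = true) :
    pvPreOk (cs.dropWhile p) = true := by
  induction cs with
  | nil => simpa using h
  | cons c rest ih =>
    by_cases hp : p c
    · rw [List.dropWhile_cons_of_pos hp]
      exact ih (pvPreOk_tail h)
    · rw [List.dropWhile_cons_of_neg hp]
      exact h

theorem pvB_tr_digit (s : List Char) (gs : List (Char × List Char)) :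
    pvB_tr (('d', s) :: gs) =
      (if s.foldl (fun r ch => r * 10 + ((ch.toNat : Int) - 48)) 0 > 0
        then [((0 : Int), s.foldl (fun r ch => r * 10 + ((ch.toNat : Int) - 48)) 0, "")] else [])
        ++ pvB_tr gs := by
  (conv_lhs => rw [pvB_tr.eq_def]); simp

theorem pvB_tr_alpha (s : List Char) (gs : List (Char × List Char)) :
    pvB_tr (('a', s) :: gs) = ((1 : Int), (s.length : Int), String.ofList s) :: pvB_tr gs := by
  (conv_lhs => rw [pvB_tr.eq_def]); simp

theorem pvB_tr_caret (s ref : List Char) (gs : List (Char × List Char)) :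
    pvB_tr (('^', s) :: ('a', ref) :: gs) =
      ((2 : Int), (ref.length : Int), String.ofList ref) :: pvB_tr gs := by
  (conv_lhs => rw [pvB_tr.eq_def]); simp

theorem pvMain : ∀ (n : Nat) (cs : List Char), cs.length ≤ n → pvPreOk cs = true →
    pvA_loop cs = pvB_tr (pvG cs) := by
  intro n
  induction n with
  | zero =>
    intro cs hlen _
    have hnil : cs = [] := List.eq_nil_of_length_eq_zero (Nat.le_zero.mp hlen)
    subst hnil
    simp [pvA_loop, pvG, pvB_tr]
  | succ n ih =>
    intro cs hlen hP
    cases cs with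
    | nil => simp [pvA_loop, pvG, pvB_tr]
    | cons c rest =>
      have h1 : rest.length ≤ n := by simp only [List.length_cons] at hlen; omega
      simp only [pvPreOk, Bool.and_eq_true] at hP
      obtain ⟨⟨hc1, hc2⟩, hc3⟩ := hP
      by_cases hd : PySem.Chars.isdigit c
      · -- digit run
        have hlen' : (rest.dropWhile PySem.Chars.isdigit).length ≤ n :=
          le_trans (List.length_dropWhile_le _ _) h1
        have hP' : pvPreOk (rest.dropWhile PySem.Chars.isdigit) = true :=
          pvPreOk_dropWhile _ hc3
        simp only [pvA_loop]
        rw [dif_pos hd, pvA_digits_eq, pvG_digit c rest hd, pvB_tr_digit,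
            List.takeWhile_cons_of_pos hd, List.dropWhile_cons_of_pos hd,
            ih _ hlen' hP']
      · have hd' : PySem.Chars.isdigit c = false := by simpa using hd
        by_cases ha : PySem.Chars.isalpha c
        · -- letter run
          have hlen' : (rest.dropWhile PySem.Chars.isalpha).length ≤ n :=
            le_trans (List.length_dropWhile_le _ _) h1
          have hP' : pvPreOk (rest.dropWhile PySem.Chars.isalpha) = true :=
            pvPreOk_dropWhile _ hc3
          simp only [pvA_loop]
          rw [dif_neg hd, dif_pos ha, pvA_alpha_eq, pvG_alpha c rest ha, pvB_tr_alpha,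
              List.takeWhile_cons_of_pos ha, List.dropWhile_cons_of_pos ha,
              ih _ hlen' hP']
          simp
        · -- gap: Pre_ forces c = '^' followed by a letter
          have ha' : PySem.Chars.isalpha c = false := by simpa using ha
          have hcar : c = '^' := by
            rw [hd', ha'] at hc1
            simpa using hc1
          subst hcar
          rw [Bool.or_eq_true] at hc2
          rcases hc2 with hc2 | hc2
          · simp at hc2
          · cases rest with
            | nil => cases hc2
            | cons d rest2 =>
              have hal : PySem.Chars.isalpha d = true := hc2
              have h2 : rest2.length ≤ n := by
                simp only [List.length_cons] at h1; omega
              have hlen' : (rest2.dropWhile PySem.Chars.isalpha).length ≤ n :=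
                le_trans (List.length_dropWhile_le _ _) h2
              have hP' : pvPreOk (rest2.dropWhile PySem.Chars.isalpha) = true :=
                pvPreOk_dropWhile _ (pvPreOk_tail hc3)
              simp only [pvA_loop]
              rw [dif_neg hd, dif_neg ha, if_pos (by trivial), pvA_alpha_eq,
                  pvG_other '^' (d :: rest2) (by decide) (by decide),
                  pvG_alpha d rest2 hal, pvB_tr_caret,
                  List.takeWhile_cons_of_pos hal, List.dropWhile_cons_of_pos hal,
                  ih _ hlen' hP']
              simp

-- ===== VERDICT (by name: the statement is the Claim_ definition above) =====
theorem mdzToList_spec : Claim_equal_mdzToList := by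
  intro md _ hP
  show mdzToList md = mdzToList_alt md
  unfold mdzToList mdzToList_alt
  rw [pvFold_eq, pvMergeRuns_nil]
  exact pvMain md.toList.length md.toList le_rfl hP
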